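-- pv_equiv track=rewrite | github.com/zackjohnson298/AdventOfCode | 2022/Python/Day24/Part1.py | populate_safe_cells
-- ===== SOURCE A (Python) =====
-- from math import lcm
--
-- def populate_safe_cells(grid, start_pos, end_pos):
--     rows = len(grid)
--     cols = len(grid[0])
--     period = lcm(rows, cols)
--     directions = {
--         '>': (0, 1),
--         '<': (0, -1),
--         '^': (-1, 0),
--         'v': (1, 0)
--     }
--     all_positions = {(r, c) for r in range(rows) for c in range(cols)} | {start_pos, end_pos}
--     safe = []
--     clouds = []
--     for r, row in enumerate(grid):
--         for c, value in enumerate(row):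
--             if value in '><v^':
--                 clouds.append([(r, c), directions[value]])
--
--     for t in range(period):
--         cloud_positions = {position for position, _ in clouds}
--         safe_positions = all_positions - cloud_positions
--         for cloud in clouds:
--             r, c = cloud[0]
--             dr, dc = cloud[1]
--             cloud[0] = ((r + dr) % rows, (c + dc) % cols)
--         safe.append(safe_positions)
--     return safe
-- ===== SOURCE B (Python) =====
-- from math import lcm
--
-- def _trajectory(position, direction, rows, cols, period):
--     (r, c), (dr, dc) = position, direction
--     traj = []
--     for _ in range(period):
--         traj.append((r, c))
--         r, c = (r + dr) % rows, (c + dc) % cols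
--     return traj
--
-- def populate_safe_cells(grid, start_pos, end_pos):
--     rows = len(grid)
--     cols = len(grid[0])
--     period = lcm(rows, cols)
--     directions = {'>': (0, 1), '<': (0, -1), '^': (-1, 0), 'v': (1, 0)}
--     all_positions = {(r, c) for r in range(rows) for c in range(cols)} | {start_pos, end_pos}
--     clouds = [((r, c), directions[v])
--               for r, row in enumerate(grid)
--               for c, v in enumerate(row) if v in directions]
--     occupied = [set() for _ in range(period)]
--     for position, direction in clouds:
--         occupied = [occ | {p}
--                     for occ, p in zip(occupied, _trajectory(position, direction, rows, cols, period))]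
--     return [all_positions - occ for occ in occupied]
-- ===== Notes on version B (the rewrite author's own statement) =====
-- stated objective: alternative
-- what changed: A mutates every cloud's stored position in place once per time step inside the time loop; B never mutates cloud state: it computes each cloud's full periodic trajectory once in a per-cloud loop and transposes the trajectories into per-time occupied sets, then subtracts each from the set of all positions.
import Mathlib
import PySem

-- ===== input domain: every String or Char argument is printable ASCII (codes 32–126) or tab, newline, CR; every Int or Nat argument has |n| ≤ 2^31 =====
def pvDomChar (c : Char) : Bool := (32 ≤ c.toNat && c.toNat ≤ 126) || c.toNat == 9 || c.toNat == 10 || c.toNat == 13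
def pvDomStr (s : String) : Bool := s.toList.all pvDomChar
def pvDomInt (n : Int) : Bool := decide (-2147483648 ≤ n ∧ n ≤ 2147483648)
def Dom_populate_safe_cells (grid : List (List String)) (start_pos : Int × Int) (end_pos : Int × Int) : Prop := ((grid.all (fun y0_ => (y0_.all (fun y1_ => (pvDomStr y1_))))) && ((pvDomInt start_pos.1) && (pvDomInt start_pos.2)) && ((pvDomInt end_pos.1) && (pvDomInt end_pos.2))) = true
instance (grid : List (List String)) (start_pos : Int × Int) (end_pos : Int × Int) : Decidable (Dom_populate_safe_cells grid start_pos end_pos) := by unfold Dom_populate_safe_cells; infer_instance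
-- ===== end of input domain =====

-- B replaces A's step-by-step mutation of all clouds per time step by computing each
-- cloud's whole trajectory once and transposing (per-cloud loop instead of per-time
-- mutation); objective: alternative decomposition, not faster.


-- ===== PORT A =====
-- the directions dict (shared literal of both Pythons)
def pvDirs : PySem.Dict String (Int × Int) :=
  ((((PySem.Dict.empty).insert ">" ((0 : Int), (1 : Int))).insert "<" (0, -1)).insert "^" (-1, 0)).insert "v" (1, 0)

def populate_safe_cells (grid : List (List String)) (start_pos : Int × Int) (end_pos : Int × Int) : List (List (Int × Int)) :=
  let rows : Int := grid.length
  let cols : Int := (PySem.List.pyGetD grid 0 []).length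
  let period : Int := (Int.lcm rows cols : Int)
  let all_positions : PySem.Set (Int × Int) :=
    PySem.Set.union
      (PySem.Set.ofList ((PySem.List.pyRange 0 rows 1).flatMap
        (fun r => (PySem.List.pyRange 0 cols 1).map (fun c => (r, c)))))
      (PySem.Set.ofList [start_pos, end_pos])
  let clouds : List ((Int × Int) × (Int × Int)) :=
    (PySem.List.enumerate grid).foldl (fun acc rw =>
      (PySem.List.enumerate rw.2).foldl (fun acc2 cv =>
        if PySem.Str.isIn cv.2 "><v^" then
          acc2 ++ [((rw.1, cv.1), PySem.Dict.getD pvDirs cv.2 (0, 0))]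
        else acc2) acc) []
  ((PySem.List.pyRange 0 period 1).foldl
    (fun (st : List (List (Int × Int)) × List ((Int × Int) × (Int × Int))) _t =>
      let cloud_positions := PySem.Set.ofList (st.2.map (fun cl => cl.1))
      let safe_positions := PySem.Set.diff all_positions cloud_positions
      let clouds' := st.2.map (fun cl =>
        ((PySem.Int.mod (cl.1.1 + cl.2.1) rows, PySem.Int.mod (cl.1.2 + cl.2.2) cols), cl.2))
      (st.1 ++ [safe_positions], clouds'))
    (([] : List (List (Int × Int))), clouds)).1

-- ===== PORT B =====
def pvTrajectory (position direction : Int × Int) (rows cols : Int) : Nat → List (Int × Int)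
  | 0 => []
  | n + 1 => position ::
      pvTrajectory (PySem.Int.mod (position.1 + direction.1) rows,
                    PySem.Int.mod (position.2 + direction.2) cols) direction rows cols n

def populate_safe_cells_alt (grid : List (List String)) (start_pos : Int × Int) (end_pos : Int × Int) : List (List (Int × Int)) :=
  let rows : Int := grid.length
  let cols : Int := (PySem.List.pyGetD grid 0 []).length
  let period : Int := (Int.lcm rows cols : Int)
  let all_positions : PySem.Set (Int × Int) :=
    PySem.Set.union
      (PySem.Set.ofList ((PySem.List.pyRange 0 rows 1).flatMap
        (fun r => (PySem.List.pyRange 0 cols 1).map (fun c => (r, c)))))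
      (PySem.Set.ofList [start_pos, end_pos])
  let clouds : List ((Int × Int) × (Int × Int)) :=
    (PySem.List.enumerate grid).flatMap (fun rw =>
      ((PySem.List.enumerate rw.2).filter (fun cv => PySem.Dict.contains pvDirs cv.2)).map
        (fun cv => ((rw.1, cv.1), PySem.Dict.getD pvDirs cv.2 (0, 0))))
  let occ0 : List (PySem.Set (Int × Int)) :=
    (PySem.List.pyRange 0 period 1).map (fun _ => PySem.Set.empty)
  let occupied := clouds.foldl (fun occ cl =>
      List.zipWith (fun s p => PySem.Set.union s (PySem.Set.ofList [p])) occ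
        (pvTrajectory cl.1 cl.2 rows cols period.toNat)) occ0
  occupied.map (fun occ => PySem.Set.diff all_positions occ)

-- ===== PRECONDITION & SPEC =====
-- Pre_ excludes grid = [] (grid[0] raises IndexError) and grids holding a cell that is a
-- multi-character or empty substring of '><v^' ('', '><', 'v^', …): on such cells
-- `value in '><v^'` is true but directions[value] raises KeyError.
def Pre_populate_safe_cells (grid : List (List String)) (start_pos : Int × Int) (end_pos : Int × Int) : Prop :=
  grid ≠ [] ∧ ∀ row ∈ grid, ∀ v ∈ row,
    PySem.Str.isIn v "><v^" = true → v ∈ ([">", "<", "^", "v"] : List String)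
instance (grid : List (List String)) (start_pos : Int × Int) (end_pos : Int × Int) : Decidable (Pre_populate_safe_cells grid start_pos end_pos) := by unfold Pre_populate_safe_cells; infer_instance
def pvWitness_populate_safe_cells : List (List String) × (Int × Int) × (Int × Int) :=
  ([[".", ">"], ["v", "."]], (0, 0), (1, 1))

def Spec_populate_safe_cells (grid : List (List String)) (start_pos : Int × Int) (end_pos : Int × Int) (out : List (List (Int × Int))) : Prop := out = populate_safe_cells_alt grid start_pos end_pos
instance (grid : List (List String)) (start_pos : Int × Int) (end_pos : Int × Int) (out : List (List (Int × Int))) : Decidable (Spec_populate_safe_cells grid start_pos end_pos out) := by unfold Spec_populate_safe_cells; infer_instance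

-- ===== CLAIM (what is proved, stated in full; the proofs are below) =====
def Claim_equal_populate_safe_cells : Prop := ∀ (grid : List (List String)) (start_pos : Int × Int) (end_pos : Int × Int), Dom_populate_safe_cells grid start_pos end_pos → Pre_populate_safe_cells grid start_pos end_pos → Spec_populate_safe_cells grid start_pos end_pos (populate_safe_cells grid start_pos end_pos)
-- ===== LEMMAS AND PROOFS =====

def pvStep (d : Int × Int) (rows cols : Int) (p : Int × Int) : Int × Int :=
  (PySem.Int.mod (p.1 + d.1) rows, PySem.Int.mod (p.2 + d.2) cols)

def pvAdv (rows cols : Int) (t : Nat) (cl : List ((Int × Int) × (Int × Int))) :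
    List ((Int × Int) × (Int × Int)) :=
  cl.map (fun q => ((pvStep q.2 rows cols)^[t] q.1, q.2))

lemma pvTrajectory_eq (d : Int × Int) (rows cols : Int) (n : Nat) (p : Int × Int) :
    pvTrajectory p d rows cols n = (List.range n).map (fun t => (pvStep d rows cols)^[t] p) := by
  induction n generalizing p with
  | zero => simp [pvTrajectory]
  | succ n ih =>
    rw [pvTrajectory, ih, List.range_succ_eq_map]
    simp only [List.map_cons, List.map_map, Function.iterate_zero, id]
    refine congrArg (p :: ·) ?_
    apply List.map_congr_left
    intro a _
    simp [Function.comp, Function.iterate_succ_apply, pvStep]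

lemma pvAdv_succ (rows cols : Int) (t : Nat) (cl : List ((Int × Int) × (Int × Int))) :
    pvAdv rows cols t (cl.map (fun c =>
      ((PySem.Int.mod (c.1.1 + c.2.1) rows, PySem.Int.mod (c.1.2 + c.2.2) cols), c.2)))
    = pvAdv rows cols (t + 1) cl := by
  simp only [pvAdv, List.map_map]
  apply List.map_congr_left
  intro c _
  simp [Function.comp, Function.iterate_succ_apply, pvStep]

lemma pvA_loop (rows cols : Int) (allP : PySem.Set (Int × Int)) (ts : List Int)
    (safe : List (List (Int × Int))) (cl : List ((Int × Int) × (Int × Int))) :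
    ts.foldl (fun st _t =>
        (st.1 ++ [PySem.Set.diff allP (PySem.Set.ofList (st.2.map (fun c => c.1)))],
         st.2.map (fun c =>
           ((PySem.Int.mod (c.1.1 + c.2.1) rows, PySem.Int.mod (c.1.2 + c.2.2) cols), c.2))))
      (safe, cl)
    = (safe ++ (List.range ts.length).map (fun t =>
         PySem.Set.diff allP (PySem.Set.ofList ((pvAdv rows cols t cl).map (fun c => c.1)))),
       pvAdv rows cols ts.length cl) := by
  induction ts generalizing safe cl with
  | nil => simp [pvAdv]
  | cons t ts ih =>
    rw [List.foldl_cons, ih]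
    simp only [pvAdv_succ, List.length_cons, List.range_succ_eq_map, List.map_cons,
      List.map_map]
    simp [pvAdv, List.append_assoc, Function.comp, Nat.succ_eq_add_one]

lemma pvB_occ (rows cols : Int) (n : Nat) (cl : List ((Int × Int) × (Int × Int)))
    (occ : List (PySem.Set (Int × Int))) (hlen : occ.length = n) :
    (cl.foldl (fun occ c => List.zipWith (fun s p => PySem.Set.union s (PySem.Set.ofList [p])) occ
        (pvTrajectory c.1 c.2 rows cols n)) occ).length = n ∧
    ∀ t, t < n → ∀ x : Int × Int,
      (x ∈ (cl.foldl (fun occ c => List.zipWith (fun s p => PySem.Set.union s (PySem.Set.ofList [p])) occ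
          (pvTrajectory c.1 c.2 rows cols n)) occ).getD t [] ↔
       x ∈ occ.getD t [] ∨ ∃ q ∈ cl, x = (pvStep q.2 rows cols)^[t] q.1) := by
  induction cl generalizing occ with
  | nil => simp [hlen]
  | cons c cl ih =>
    have hlen' : (List.zipWith (fun s p => PySem.Set.union s (PySem.Set.ofList [p])) occ
        (pvTrajectory c.1 c.2 rows cols n)).length = n := by
      simp [List.length_zipWith, pvTrajectory_eq, hlen]
    obtain ⟨hL, hM⟩ := ih _ hlen'
    refine ⟨by simpa using hL, ?_⟩
    intro t ht x
    rw [List.foldl_cons, hM t ht x]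
    have ht1 : t < occ.length := by omega
    have hz : (List.zipWith (fun s p => PySem.Set.union s (PySem.Set.ofList [p])) occ
        (pvTrajectory c.1 c.2 rows cols n)).getD t []
        = PySem.Set.union (occ.getD t []) (PySem.Set.ofList [(pvStep c.2 rows cols)^[t] c.1]) := by
      rw [List.getD_eq_getElem?_getD, List.getElem?_zipWith, List.getElem?_eq_getElem ht1,
        pvTrajectory_eq, List.getElem?_map, List.getElem?_range ht]
      simp [List.getElem?_eq_getElem ht1]
    rw [hz, PySem.Set.mem_union, PySem.Set.mem_ofList]
    simp only [List.mem_cons, List.not_mem_nil, or_false, exists_eq_or_imp]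
    tauto

lemma pvSnd_mem_of_mem_enumerate {α : Type} {l : List α} {s : Int} {cv : Int × α}
    (h : cv ∈ PySem.List.enumerate l s) : cv.2 ∈ l := by
  have := List.mem_map_of_mem (f := fun p : Int × α => p.2) h
  rwa [PySem.List.map_snd_enumerate] at this

lemma pvCond_eq (v : String)
    (h : PySem.Str.isIn v "><v^" = true → v ∈ ([">", "<", "^", "v"] : List String)) :
    PySem.Str.isIn v "><v^" = PySem.Dict.contains pvDirs v := by
  by_cases hA : PySem.Str.isIn v "><v^" = true
  · have hv := h hA
    fin_cases hv <;> decide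
  · have hB : PySem.Dict.contains pvDirs v = false := by
      by_contra hc
      rw [Bool.not_eq_false] at hc
      have hk := (PySem.Dict.contains_iff_mem_keys pvDirs v).1 hc
      have hkeys : (pvDirs).keys = [">", "<", "^", "v"] := by decide
      rw [hkeys] at hk
      fin_cases hk <;> exact hA (by decide)
    rw [Bool.not_eq_true] at hA
    rw [hA, hB]

lemma pvClouds_eq (grid : List (List String))
    (h : ∀ row ∈ grid, ∀ v ∈ row,
      PySem.Str.isIn v "><v^" = true → v ∈ ([">", "<", "^", "v"] : List String)) :
    (PySem.List.enumerate grid).foldl (fun acc rw =>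
      (PySem.List.enumerate rw.2).foldl (fun acc2 cv =>
        if PySem.Str.isIn cv.2 "><v^" then
          acc2 ++ [((rw.1, cv.1), PySem.Dict.getD pvDirs cv.2 (0, 0))]
        else acc2) acc) []
    = (PySem.List.enumerate grid).flatMap (fun rw =>
      ((PySem.List.enumerate rw.2).filter (fun cv => PySem.Dict.contains pvDirs cv.2)).map
        (fun cv => ((rw.1, cv.1), PySem.Dict.getD pvDirs cv.2 (0, 0)))) := by
  have hstep : ∀ (acc : List ((Int × Int) × (Int × Int))),
      ∀ rw ∈ PySem.List.enumerate grid,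
      (PySem.List.enumerate rw.2).foldl (fun acc2 cv =>
        if PySem.Str.isIn cv.2 "><v^" then
          acc2 ++ [((rw.1, cv.1), PySem.Dict.getD pvDirs cv.2 (0, 0))]
        else acc2) acc
      = acc ++ ((PySem.List.enumerate rw.2).filter
          (fun cv => PySem.Dict.contains pvDirs cv.2)).map
          (fun cv => ((rw.1, cv.1), PySem.Dict.getD pvDirs cv.2 (0, 0))) := by
    intro acc rw hrw
    have hfilt : (PySem.List.enumerate rw.2).filter
          (fun cv => PySem.Dict.contains pvDirs cv.2)
        = (PySem.List.enumerate rw.2).filter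
          (fun cv => PySem.Str.isIn cv.2 "><v^") :=
      List.filter_congr (fun cv hcv =>
        (pvCond_eq cv.2 (h rw.2 (pvSnd_mem_of_mem_enumerate hrw) cv.2
          (pvSnd_mem_of_mem_enumerate hcv))).symm)
    rw [hfilt]
    exact PySem.List.foldl_append_if _ _ _ acc
  rw [PySem.List.foldl_congr_mem _ _ _ _ hstep, PySem.List.foldl_append_eq_flatMap,
    List.nil_append]

lemma pvDiff_congr {a s s' : PySem.Set (Int × Int)} (h : ∀ x, x ∈ s ↔ x ∈ s') :
    PySem.Set.diff a s = PySem.Set.diff a s' := by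
  simp only [PySem.Set.diff, PySem.Set.contains]
  refine List.filter_congr (fun x _ => ?_)
  congr 1
  by_cases hx : x ∈ s
  · simp [List.contains_eq_mem, hx, (h x).1 hx]
  · have hx' : ¬ x ∈ s' := fun hx' => hx ((h x).2 hx')
    simp [List.contains_eq_mem, hx, hx']

-- ===== VERDICT (by name: the statement is the Claim_ definition above) =====
theorem populate_safe_cells_spec : Claim_equal_populate_safe_cells := by
  intro grid sp ep _hDom hPre
  obtain ⟨hne, hcells⟩ := hPre
  unfold Spec_populate_safe_cells populate_safe_cells populate_safe_cells_alt
  simp only [pvClouds_eq grid hcells]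
  set rows : Int := (grid.length : Int) with hrows
  set cols : Int := ((PySem.List.pyGetD grid 0 []).length : Int) with hcols
  set period : Int := ((Int.lcm rows cols : Nat) : Int) with hperiod
  set cl : List ((Int × Int) × (Int × Int)) :=
    (PySem.List.enumerate grid).flatMap (fun rw =>
      ((PySem.List.enumerate rw.2).filter (fun cv => PySem.Dict.contains pvDirs cv.2)).map
        (fun cv => ((rw.1, cv.1), PySem.Dict.getD pvDirs cv.2 (0, 0)))) with hcl
  set allP : PySem.Set (Int × Int) :=
    PySem.Set.union
      (PySem.Set.ofList ((PySem.List.pyRange 0 rows 1).flatMap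
        (fun r => (PySem.List.pyRange 0 cols 1).map (fun c => (r, c)))))
      (PySem.Set.ofList [sp, ep]) with hallP
  set occ0 : List (PySem.Set (Int × Int)) :=
    (PySem.List.pyRange 0 period 1).map (fun _ => PySem.Set.empty) with hocc0
  have hocc0len : occ0.length = period.toNat := by
    simp [hocc0, PySem.List.length_pyRange_one]
  obtain ⟨hL, hM⟩ := pvB_occ rows cols period.toNat cl occ0 hocc0len
  rw [pvA_loop rows cols allP (PySem.List.pyRange 0 period 1) [] cl]
  have hlenRange : (PySem.List.pyRange 0 period 1).length = period.toNat := by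
    simp [PySem.List.length_pyRange_one]
  refine List.ext_getElem ?_ ?_
  · simp [hlenRange, hL]
  · intro t ht1 ht2
    have htN : t < period.toNat := by
      simp only [List.nil_append, List.length_map, List.length_range, hlenRange] at ht1
      exact ht1
    have htF : t < (cl.foldl (fun occ c =>
        List.zipWith (fun s p => PySem.Set.union s (PySem.Set.ofList [p])) occ
          (pvTrajectory c.1 c.2 rows cols period.toNat)) occ0).length := by
      rw [hL]; exact htN
    simp only [List.nil_append, List.getElem_map, List.getElem_range]
    refine pvDiff_congr ?_
    intro x
    have hocc0t : occ0.getD t [] = [] := by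
      rw [List.getD_eq_getElem _ _ (by omega : t < occ0.length)]
      simp [hocc0]
    have hF := hM t htN x
    rw [List.getD_eq_getElem _ [] htF, hocc0t] at hF
    simp only [List.not_mem_nil, false_or] at hF
    rw [hF]
    simp only [PySem.Set.mem_ofList, pvAdv, List.map_map, List.mem_map, Function.comp]
    constructor
    · rintro ⟨q, hq, h⟩
      exact ⟨q, hq, h.symm⟩
    · rintro ⟨q, hq, h⟩
      exact ⟨q, hq, h.symm⟩
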